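-- pv_equiv track=rewrite | github.com/MaplumeX/deepresearch | app/services/planning.py | _finalize_coverage_tags
-- ===== SOURCE A (Python) =====
-- def _finalize_coverage_tags(tags: list[str]) -> list[str]:
--     finalized: list[str] = []
--     seen: set[str] = set()
--     for tag in tags:
--         normalized = " ".join(str(tag).split()).strip().casefold()
--         if not normalized or normalized in seen:
--             continue
--         seen.add(normalized)
--         finalized.append(normalized)
--     if not finalized:
--         return ["evidence"]
--     return finalized
-- ===== SOURCE B (Python) =====
-- def _finalize_coverage_tags(tags: list[str]) -> list[str]:
--     normalized = [" ".join(str(t).split()).strip().casefold() for t in tags]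
--     first: dict[str, int] = {}
--     for i, n in reversed(list(enumerate(normalized))):
--         if n:
--             first[n] = i
--     ordered = sorted(first.items(), key=lambda kv: kv[1])
--     return [n for n, _ in ordered] or ["evidence"]
-- ===== Notes on version B (the rewrite author's own statement) =====
-- stated objective: alternative
-- what changed: Instead of a forward pass that tests each tag against a growing seen-set, B makes a backward pass that unconditionally overwrites a dict entry with the tag's index (so each key ends up at its first index, with no membership test anywhere), then sorts the dict items by that index to recover first-occurrence order.
import Mathlib
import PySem

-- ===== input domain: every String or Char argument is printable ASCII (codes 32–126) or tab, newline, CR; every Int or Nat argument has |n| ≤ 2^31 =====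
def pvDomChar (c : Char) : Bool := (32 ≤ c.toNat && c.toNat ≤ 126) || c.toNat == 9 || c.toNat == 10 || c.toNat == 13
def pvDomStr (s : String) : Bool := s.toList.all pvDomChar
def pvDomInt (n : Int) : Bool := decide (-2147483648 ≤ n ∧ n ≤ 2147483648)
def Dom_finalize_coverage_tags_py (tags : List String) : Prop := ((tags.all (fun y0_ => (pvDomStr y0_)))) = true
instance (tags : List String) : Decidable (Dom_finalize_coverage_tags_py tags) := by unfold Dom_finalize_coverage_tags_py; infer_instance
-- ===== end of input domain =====

-- B replaces A's forward pass with a seen-set by a backward pass that unconditionally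
-- overwrites a dict entry with the tag's index (each key ends at its first index, with no
-- membership test), then sorts the dict items by that index; objective: alternative.

-- normalized = " ".join(str(tag).split()).strip().casefold()
-- (casefold is ported as PySem.Str.lower, exact on the ASCII domain Dom; str(tag) is the identity on str)
def pvNorm (t : String) : String :=
  PySem.Str.lower (PySem.Str.strip (PySem.Str.join " " (PySem.Str.split₀ t)))

-- ===== PORT A =====
-- the for-loop of A over (finalized, seen)
def pvLoopA : List String → List String → PySem.Set String → List String
  | [], finalized, _ => finalized
  | tag :: rest, finalized, seen =>
    if pvNorm tag = "" ∨ pvNorm tag ∈ seen then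
      pvLoopA rest finalized seen
    else
      pvLoopA rest (finalized ++ [pvNorm tag]) (PySem.Set.add seen (pvNorm tag))

def finalize_coverage_tags_py (tags : List String) : List String :=
  let finalized := pvLoopA tags [] PySem.Set.empty
  if finalized = [] then ["evidence"] else finalized

-- ===== PORT B =====
-- for i, n in reversed(list(enumerate(normalized))): if n: first[n] = i
def pvDictB (e : List (Int × String)) : PySem.Dict String Int :=
  e.reverse.foldl (fun d p => if p.2 = "" then d else d.insert p.2 p.1) PySem.Dict.empty

def finalize_coverage_tags_py_alt (tags : List String) : List String :=
  let normalized := tags.map pvNorm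
  let first := pvDictB (PySem.List.enumerate normalized 0)
  let ordered := PySem.List.sorted first.items (fun kv => kv.2) false
  let res := ordered.map (fun kv => kv.1)
  if res = [] then ["evidence"] else res

-- ===== PRECONDITION & SPEC =====
def Spec_finalize_coverage_tags_py (tags : List String) (out : List String) : Prop := out = finalize_coverage_tags_py_alt tags
instance (tags : List String) (out : List String) : Decidable (Spec_finalize_coverage_tags_py tags out) := by unfold Spec_finalize_coverage_tags_py; infer_instance

-- ===== CLAIM (what is proved, stated in full; the proofs are below) =====
def Claim_equal_finalize_coverage_tags_py : Prop := ∀ (tags : List String), Dom_finalize_coverage_tags_py tags → Spec_finalize_coverage_tags_py tags (finalize_coverage_tags_py tags)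

-- ===== LEMMAS AND PROOFS =====

-- proof-side helpers: the first-occurrence dedup step (as a foldr) and the target list
-- of (tag, first index) pairs in first-occurrence order
def pvStepB (acc : List String) (n : String) : List String :=
  if n = "" then acc else n :: acc.filter (fun y => y ≠ n)

def pvTL : List String → Int → List (String × Int)
  | [], _ => []
  | n :: ns, s =>
    if n = "" then pvTL ns (s + 1)
    else (n, s) :: (pvTL ns (s + 1)).filter (fun q => q.1 ≠ n)

-- B's backward foldl is the foldr of insert-if-nonempty
def pvDBr (e : List (Int × String)) : PySem.Dict String Int :=
  e.foldr (fun p d => if p.2 = "" then d else d.insert p.2 p.1) PySem.Dict.empty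

lemma pvDictB_eq_pvDBr (e : List (Int × String)) : pvDictB e = pvDBr e := by
  simp [pvDictB, pvDBr, List.foldl_reverse]

-- A's fused loop equals: foldr-dedup of the normalized list, with the seen elements
-- filtered out, appended to the accumulated prefix.
lemma pvLoopA_eq (l : List String) (fin : List String) (seen : PySem.Set String) :
    pvLoopA l fin seen
      = fin ++ ((l.map pvNorm).foldr (fun n acc => pvStepB acc n) []).filter
          (fun y => ¬ y ∈ seen) := by
  induction l generalizing fin seen with
  | nil => simp [pvLoopA]
  | cons t ts ih =>
    by_cases h : pvNorm t = ""
    · simp [pvLoopA, h, ih, pvStepB]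
    · by_cases hc : pvNorm t ∈ seen
      · rw [pvLoopA, if_pos (Or.inr hc), ih]
        refine congrArg (fin ++ ·) ?_
        simp only [List.map_cons, List.foldr_cons, pvStepB, if_neg h, List.filter_cons, hc,
          decide_not, decide_true, Bool.not_true, Bool.false_eq_true, if_false, List.filter_filter]
        rw [List.filter_congr]
        intro y _
        by_cases hy : y ∈ seen
        · simp [hy]
        · have hne : y ≠ pvNorm t := fun e => hy (e ▸ hc)
          simp [hy, hne]
      · rw [pvLoopA, if_neg (fun hor => hor.elim h hc), ih]
        rw [List.append_assoc, List.singleton_append]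
        refine congrArg (fin ++ ·) ?_
        simp only [List.map_cons, List.foldr_cons, pvStepB, if_neg h, List.filter_cons, hc,
          decide_not, decide_false, Bool.not_false, if_true, List.filter_filter]
        refine congrArg (pvNorm t :: ·) ?_
        rw [List.filter_congr]
        intro y _
        by_cases hy : y = pvNorm t
        · simp [hy, PySem.Set.mem_add]
        · by_cases hs : y ∈ seen <;> simp [PySem.Set.mem_add, hy, hs]

-- the dict built by the backward overwrite pass holds exactly the nonempty tags,
-- each with its FIRST index (find? over the pair list)
lemma pvDBr_keys_nodup (e : List (Int × String)) : (pvDBr e).keys.Nodup := by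
  induction e with
  | nil => exact PySem.Dict.nodup_keys_empty
  | cons p e ih =>
    by_cases h : p.2 = ""
    · simpa [pvDBr, h] using ih
    · simpa [pvDBr, h] using PySem.Dict.nodup_keys_insert _ _ _ ih

lemma mem_items_pvDBr (e : List (Int × String)) (k : String) (v : Int) :
    (k, v) ∈ (pvDBr e).items ↔
      (¬ k = "" ∧ e.find? (fun p => p.2 == k) = some (v, k)) := by
  induction e with
  | nil => simp [pvDBr, PySem.Dict.empty]
  | cons p e ih =>
    obtain ⟨i, n⟩ := p
    show (k, v) ∈ (if n = "" then pvDBr e else (pvDBr e).insert n i).items ↔ _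
    by_cases h : n = ""
    · rw [if_pos h]
      by_cases hk : k = ""
      · constructor
        · intro hm; exact absurd hk (ih.mp hm).1
        · rintro ⟨hne, _⟩; exact absurd hk hne
      · rw [show List.find? (fun p => p.2 == k) ((i, n) :: e) = List.find? (fun p => p.2 == k) e
            from List.find?_cons_of_neg (by simp only [beq_iff_eq]; exact fun hkn => hk (h ▸ hkn.symm))]
        exact ih
    · rw [if_neg h, PySem.Dict.mem_items_insert]
      by_cases hpk : n = k
      · subst hpk
        rw [show List.find? (fun p => p.2 == n) ((i, n) :: e) = some (i, n)
            from List.find?_cons_of_pos (by simp)]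
        constructor
        · rintro (hp | ⟨hm, hne⟩)
          · rw [Prod.mk.injEq] at hp
            exact ⟨h, by rw [hp.2]⟩
          · exact absurd rfl hne
        · rintro ⟨_, hf⟩
          rw [Option.some.injEq, Prod.mk.injEq] at hf
          exact Or.inl (by rw [hf.1])
      · rw [show List.find? (fun p => p.2 == k) ((i, n) :: e) = List.find? (fun p => p.2 == k) e
            from List.find?_cons_of_neg (by simp only [beq_iff_eq]; exact hpk)]
        constructor
        · rintro (hp | ⟨hm, _⟩)
          · rw [Prod.mk.injEq] at hp
            exact absurd hp.1.symm hpk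
          · exact ih.mp hm
        · intro hkf
          exact Or.inr ⟨ih.mpr hkf, fun e => hpk e.symm⟩

-- the target list holds the same pairs
lemma mem_pvTL (ns : List String) (s : Int) (k : String) (v : Int) :
    (k, v) ∈ pvTL ns s ↔
      (¬ k = "" ∧ (PySem.List.enumerate ns s).find? (fun p => p.2 == k) = some (v, k)) := by
  induction ns generalizing s with
  | nil => simp [pvTL, PySem.List.enumerate_nil]
  | cons n ns ih =>
    rw [PySem.List.enumerate_cons]
    by_cases h : n = ""
    · rw [pvTL, if_pos h]
      by_cases hk : k = ""
      · constructor
        · intro hm; exact absurd hk ((ih (s + 1)).mp hm).1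
        · rintro ⟨hne, _⟩; exact absurd hk hne
      · rw [show List.find? (fun p => p.2 == k) ((s, n) :: PySem.List.enumerate ns (s + 1))
              = List.find? (fun p => p.2 == k) (PySem.List.enumerate ns (s + 1))
            from List.find?_cons_of_neg (by simp only [beq_iff_eq]; exact fun hkn => hk (h ▸ hkn.symm))]
        exact ih (s + 1)
    · rw [pvTL, if_neg h]
      by_cases hpk : n = k
      · subst hpk
        rw [show List.find? (fun p => p.2 == n) ((s, n) :: PySem.List.enumerate ns (s + 1))
              = some (s, n) from List.find?_cons_of_pos (by simp)]
        simp only [List.mem_cons, List.mem_filter]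
        constructor
        · rintro (hp | ⟨hm, hne⟩)
          · rw [Prod.mk.injEq] at hp
            exact ⟨h, by rw [hp.2]⟩
          · simp at hne
        · rintro ⟨_, hf⟩
          rw [Option.some.injEq, Prod.mk.injEq] at hf
          exact Or.inl (by rw [hf.1])
      · rw [show List.find? (fun p => p.2 == k) ((s, n) :: PySem.List.enumerate ns (s + 1))
              = List.find? (fun p => p.2 == k) (PySem.List.enumerate ns (s + 1))
            from List.find?_cons_of_neg (by simp only [beq_iff_eq]; exact hpk)]
        simp only [List.mem_cons, List.mem_filter]
        constructor
        · rintro (hp | ⟨hm, _⟩)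
          · rw [Prod.mk.injEq] at hp
            exact absurd hp.1.symm hpk
          · exact (ih (s + 1)).mp hm
        · intro hkf
          refine Or.inr ⟨(ih (s + 1)).mpr hkf, ?_⟩
          simp only [decide_eq_true_eq]
          exact fun e => hpk e.symm

-- the target list's indices are ≥ s and strictly increasing
lemma pvTL_lb (ns : List String) (s : Int) : ∀ p ∈ pvTL ns s, s ≤ p.2 := by
  induction ns generalizing s with
  | nil => simp [pvTL]
  | cons n ns ih =>
    intro p hp
    by_cases h : n = ""
    · rw [pvTL, if_pos h] at hp
      have := ih (s + 1) p hp
      omega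
    · rw [pvTL, if_neg h] at hp
      rcases List.mem_cons.mp hp with hp | hp
      · subst hp; simp
      · have := ih (s + 1) p (List.mem_of_mem_filter hp)
        omega

lemma pvTL_pairwise (ns : List String) (s : Int) :
    (pvTL ns s).Pairwise (fun a b => a.2 < b.2) := by
  induction ns generalizing s with
  | nil => simp [pvTL]
  | cons n ns ih =>
    by_cases h : n = ""
    · rw [pvTL, if_pos h]; exact ih (s + 1)
    · rw [pvTL, if_neg h]
      refine List.Pairwise.cons ?_ ((ih (s + 1)).filter _)
      intro p hp
      have := pvTL_lb ns (s + 1) p (List.mem_of_mem_filter hp)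
      simpa using by omega

lemma pvTL_nodup (ns : List String) (s : Int) : (pvTL ns s).Nodup :=
  (pvTL_pairwise ns s).imp (fun h => by intro e; rw [e] at h; omega)

-- the pvTL's first components are exactly the foldr-dedup of ns
lemma map_fst_pvTL (ns : List String) (s : Int) :
    (pvTL ns s).map Prod.fst = ns.foldr (fun n acc => pvStepB acc n) [] := by
  induction ns generalizing s with
  | nil => simp [pvTL]
  | cons n ns ih =>
    by_cases h : n = ""
    · simp [pvTL, h, ih, pvStepB]
    · rw [pvTL, if_neg h, List.foldr_cons, pvStepB, if_neg h]
      rw [List.map_cons, ← ih (s + 1), List.filter_map]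
      rfl

-- sorting the dict items by index yields exactly the target list
lemma sorted_items_pvDictB (ns : List String) :
    PySem.List.sorted (pvDictB (PySem.List.enumerate ns 0)).items (fun kv => kv.2) false
      = pvTL ns 0 := by
  refine PySem.List.sorted_eq_of_perm_of_pairwise_lt _ _ _ ?_ (pvTL_pairwise ns 0)
  have hn1 : (pvTL ns 0).Nodup := pvTL_nodup ns 0
  have hn2 : (pvDictB (PySem.List.enumerate ns 0)).items.Nodup := by
    rw [pvDictB_eq_pvDBr]
    exact List.Nodup.of_map Prod.fst (pvDBr_keys_nodup _)
  refine (List.perm_ext_iff_of_nodup hn1 hn2).mpr ?_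
  rintro ⟨k, v⟩
  rw [mem_pvTL, pvDictB_eq_pvDBr, mem_items_pvDBr]

-- ===== VERDICT (by name: the statement is the Claim_ definition above) =====
theorem finalize_coverage_tags_py_spec : Claim_equal_finalize_coverage_tags_py := by
  intro tags _
  unfold Spec_finalize_coverage_tags_py finalize_coverage_tags_py finalize_coverage_tags_py_alt
  show (if pvLoopA tags [] PySem.Set.empty = [] then ["evidence"] else pvLoopA tags [] PySem.Set.empty)
      = (if (PySem.List.sorted (pvDictB (PySem.List.enumerate (tags.map pvNorm) 0)).items
              (fun kv => kv.2) false).map (fun kv => kv.1) = [] then ["evidence"]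
          else (PySem.List.sorted (pvDictB (PySem.List.enumerate (tags.map pvNorm) 0)).items
              (fun kv => kv.2) false).map (fun kv => kv.1))
  rw [pvLoopA_eq, sorted_items_pvDictB]
  have : (pvTL (tags.map pvNorm) 0).map (fun kv => kv.1)
      = ((tags.map pvNorm).foldr (fun n acc => pvStepB acc n) []) := map_fst_pvTL _ 0
  rw [this]
  simp [PySem.Set.empty]
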